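-- pv_equiv track=rewrite | github.com/fjkiani/crispro-backend-v2 | scripts/benchmark_sl/error_analysis.py | analyze_by_cancer_type
-- ===== SOURCE A (Python) =====
-- from typing import List, Dict, Any
-- from collections import defaultdict
--
-- def analyze_by_cancer_type(errors: Dict[str, List]) -> Dict[str, Any]:
--     """Analyze errors by cancer type."""
--     cancer_stats = defaultdict(lambda: {"fp": 0, "fn": 0, "tp": 0, "tn": 0})
--
--     for category, cases in errors.items():
--         for case in cases:
--             cancer = case.get("disease", "unknown")
--             if category == "false_positives":
--                 cancer_stats[cancer]["fp"] += 1
--             elif category == "false_negatives":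
--                 cancer_stats[cancer]["fn"] += 1
--             elif category == "true_positives":
--                 cancer_stats[cancer]["tp"] += 1
--             elif category == "true_negatives":
--                 cancer_stats[cancer]["tn"] += 1
--
--     return dict(cancer_stats)
-- ===== SOURCE B (Python) =====
-- _KEYS = {"false_positives": "fp", "false_negatives": "fn",
--          "true_positives": "tp", "true_negatives": "tn"}
--
-- def analyze_by_cancer_type(errors):
--     """Analyze errors by cancer type (event-stream version)."""
--     events = []
--     for category, cases in errors.items():
--         short = _KEYS.get(category)
--         if short is not None:
--             for case in cases:
--                 events.append((case.get("disease", "unknown"), short))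
--     seen = []
--     for d, _ in events:
--         if d not in seen:
--             seen.append(d)
--     return {d: {k: events.count((d, k)) for k in ("fp", "fn", "tp", "tn")}
--             for d in seen}
-- ===== Notes on version B (the rewrite author's own statement) =====
-- stated objective: alternative
-- what changed: A does one incremental pass bumping a field in a per-cancer defaultdict row; B instead flattens the input into a flat (disease, key) event list, dedups the diseases, and builds each cancer's row by scanning the event list with list.count per key - no incremental counters at all.
import Mathlib
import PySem

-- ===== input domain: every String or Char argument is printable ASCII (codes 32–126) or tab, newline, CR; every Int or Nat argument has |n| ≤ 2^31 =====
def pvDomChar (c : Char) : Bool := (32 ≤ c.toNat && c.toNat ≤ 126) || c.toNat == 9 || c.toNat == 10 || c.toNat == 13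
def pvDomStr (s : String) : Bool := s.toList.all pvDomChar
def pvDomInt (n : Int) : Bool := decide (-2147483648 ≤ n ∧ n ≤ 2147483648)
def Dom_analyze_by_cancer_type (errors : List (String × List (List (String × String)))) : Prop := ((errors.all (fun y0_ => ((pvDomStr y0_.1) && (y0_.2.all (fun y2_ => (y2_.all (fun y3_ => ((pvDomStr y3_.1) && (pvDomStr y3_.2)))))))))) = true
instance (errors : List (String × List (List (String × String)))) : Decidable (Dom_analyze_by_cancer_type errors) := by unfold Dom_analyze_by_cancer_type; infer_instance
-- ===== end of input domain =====

-- B replaces A's incremental per-cancer defaultdict pass by a flat (disease, key) event list,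
-- deduplicated diseases, and rows counted by scanning the event list (objective: alternative).

-- ===== PORT A =====
-- case.get("disease", "unknown")  (shared dict-lookup primitive; a case is a dict)
def pvCaseGet (case : List (String × String)) : String :=
  (PySem.Dict.mk case).getD "disease" "unknown"

-- the defaultdict's default row {"fp":0,"fn":0,"tp":0,"tn":0}
def pvRowDefault : PySem.Dict String Int :=
  PySem.Dict.mk [("fp", 0), ("fn", 0), ("tp", 0), ("tn", 0)]

-- cancer_stats[cancer][field] += 1  (defaultdict access inserts the default row; 'field'
-- is always a key of the row, so Python's d[field] += 1 is modify field 0 (·+1))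
def pvBump (stats : PySem.Dict String (PySem.Dict String Int)) (cancer field : String) :
    PySem.Dict String (PySem.Dict String Int) :=
  stats.insert cancer ((stats.getD cancer pvRowDefault).modify field 0 (· + 1))

def analyze_by_cancer_type (errors : List (String × List (List (String × String)))) : List (String × List (String × Int)) :=
  ((errors.foldl (fun stats e =>
      e.2.foldl (fun stats case =>
        let cancer := pvCaseGet case
        if e.1 == "false_positives" then pvBump stats cancer "fp"
        else if e.1 == "false_negatives" then pvBump stats cancer "fn"
        else if e.1 == "true_positives" then pvBump stats cancer "tp"
        else if e.1 == "true_negatives" then pvBump stats cancer "tn"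
        else stats) stats)
    PySem.Dict.empty).items).map (fun p => (p.1, p.2.items))

-- ===== PORT B =====
-- the module-level table _KEYS
def pvCatKeys : PySem.Dict String String :=
  PySem.Dict.mk [("false_positives", "fp"), ("false_negatives", "fn"),
                 ("true_positives", "tp"), ("true_negatives", "tn")]

def analyze_by_cancer_type_alt (errors : List (String × List (List (String × String)))) : List (String × List (String × Int)) :=
  -- events = []; for category, cases: short = _KEYS.get(category); if short is not None:
  --   for case in cases: events.append((case.get("disease","unknown"), short))
  let events : List (String × String) := errors.foldl (fun ev e =>
    match pvCatKeys.get? e.1 with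
    | none => ev
    | some short => e.2.foldl (fun ev case => ev ++ [(pvCaseGet case, short)]) ev) []
  -- seen = []; for d, _ in events: if d not in seen: seen.append(d)
  let seen : PySem.Set String :=
    events.foldl (fun (s : PySem.Set String) p => PySem.Set.add s p.1) PySem.Set.empty
  -- {d: {k: events.count((d, k)) for k in ("fp","fn","tp","tn")} for d in seen}
  seen.map (fun d =>
    (d, [("fp", (PySem.List.count events (d, "fp") : Int)),
         ("fn", (PySem.List.count events (d, "fn") : Int)),
         ("tp", (PySem.List.count events (d, "tp") : Int)),
         ("tn", (PySem.List.count events (d, "tn") : Int))]))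

-- ===== PRECONDITION & SPEC =====
def Spec_analyze_by_cancer_type (errors : List (String × List (List (String × String)))) (out : List (String × List (String × Int))) : Prop := out = analyze_by_cancer_type_alt errors
instance (errors : List (String × List (List (String × String)))) (out : List (String × List (String × Int))) : Decidable (Spec_analyze_by_cancer_type errors out) := by unfold Spec_analyze_by_cancer_type; infer_instance

-- ===== CLAIM (what is proved, stated in full; the proofs are below) =====
def Claim_equal_analyze_by_cancer_type : Prop := ∀ (errors : List (String × List (List (String × String)))), Dom_analyze_by_cancer_type errors → Spec_analyze_by_cancer_type errors (analyze_by_cancer_type errors)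

-- ===== LEMMAS AND PROOFS =====

-- a fully-materialised row {"fp":a,"fn":b,"tp":c,"tn":e}
def pvRow (a b c e : Int) : PySem.Dict String Int :=
  PySem.Dict.mk [("fp", a), ("fn", b), ("tp", c), ("tn", e)]

-- diseases of the event stream, first occurrences in order
def pvSeen (ev : List (String × String)) : PySem.Set String :=
  ev.foldl (fun (s : PySem.Set String) p => PySem.Set.add s p.1) PySem.Set.empty

-- the row read off the event stream by counting
def pvRowOf (ev : List (String × String)) (d : String) : PySem.Dict String Int :=
  pvRow (PySem.List.count ev (d, "fp")) (PySem.List.count ev (d, "fn"))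
        (PySem.List.count ev (d, "tp")) (PySem.List.count ev (d, "tn"))

-- A's state expressed through the event stream
def pvStatsOf (ev : List (String × String)) : PySem.Dict String (PySem.Dict String Int) :=
  PySem.Dict.mk ((pvSeen ev).map (fun d => (d, pvRowOf ev d)))

theorem pv_getD_mk_map (order : List String) (g : String → PySem.Dict String Int) (d : String)
    (dflt : PySem.Dict String Int) :
    (PySem.Dict.mk (order.map (fun c => (c, g c)))).getD d dflt
      = if d ∈ order then g d else dflt := by
  induction order with
  | nil => simp [PySem.Dict.getD, PySem.Dict.get?]
  | cons a t ih =>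
    by_cases h : a = d
    · subst h; simp [PySem.Dict.getD, PySem.Dict.get?]
    · simpa [PySem.Dict.getD, PySem.Dict.get?, List.find?, h, Ne.symm h] using ih

theorem pv_keys_mk_map (order : List String) (g : String → PySem.Dict String Int) :
    (PySem.Dict.mk (order.map (fun c => (c, g c)))).keys = order := by
  simp [PySem.Dict.keys, List.map_map, Function.comp_def]

theorem pv_insert_mk_map (order : List String)
    (g g' : String → PySem.Dict String Int) (d : String) (v : PySem.Dict String Int)
    (hv : v = g' d) (hne : ∀ c, c ≠ d → g' c = g c) :
    (PySem.Dict.mk (order.map (fun c => (c, g c)))).insert d v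
      = PySem.Dict.mk ((PySem.Set.add order d).map (fun c => (c, g' c))) := by
  by_cases hmem : d ∈ order
  · have hc : (PySem.Dict.mk (order.map (fun c => (c, g c)))).contains d = true := by
      rw [PySem.Dict.contains_iff_mem_keys, pv_keys_mk_map]; exact hmem
    apply PySem.Dict.ext
    rw [PySem.Dict.items_insert_of_contains _ _ hc, PySem.Set.add_of_mem hmem]
    show (order.map (fun c => (c, g c))).map _ = _
    rw [List.map_map]
    apply List.map_congr_left
    intro c hcm
    by_cases h : c = d
    · subst h; simp [hv]
    · simp [h, hne c h]
  · have hc : (PySem.Dict.mk (order.map (fun c => (c, g c)))).contains d = false := by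
      rw [Bool.eq_false_iff, Ne, PySem.Dict.contains_iff_mem_keys, pv_keys_mk_map]; exact hmem
    apply PySem.Dict.ext
    rw [PySem.Dict.items_insert_of_not_contains _ _ hc, PySem.Set.add_of_not_mem hmem]
    show order.map (fun c => (c, g c)) ++ [(d, v)] = _
    rw [List.map_append]
    congr 1
    · apply List.map_congr_left
      intro c hcm
      rw [hne c (fun h => hmem (h ▸ hcm))]
    · simp [hv]

theorem pv_seen_eq_ofList (ev : List (String × String)) :
    pvSeen ev = PySem.Set.ofList (ev.map Prod.fst) := by
  rw [PySem.Set.ofList_eq_foldl, List.foldl_map]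
  rfl

theorem pv_seen_append_single (ev : List (String × String)) (x : String × String) :
    pvSeen (ev ++ [x]) = PySem.Set.add (pvSeen ev) x.1 := by
  simp [pvSeen, List.foldl_append]

theorem pv_count_zero_of_not_seen (ev : List (String × String)) (d k : String)
    (h : d ∉ pvSeen ev) : PySem.List.count ev (d, k) = 0 := by
  rw [pv_seen_eq_ofList, PySem.Set.mem_ofList] at h
  refine List.count_eq_zero.2 (fun hm => h ?_)
  exact List.mem_map.2 ⟨(d, k), hm, rfl⟩

theorem pv_count_append_single (ev : List (String × String)) (x v : String × String) :
    PySem.List.count (ev ++ [x]) v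
      = PySem.List.count ev v + (if v = x then 1 else 0) := by
  by_cases h : v = x
  · subst h; simp [PySem.List.count, List.count_append]
  · simp [PySem.List.count, List.count_append, h, Ne.symm h]

theorem pv_rowOf_append_ne (ev : List (String × String)) (d short c : String)
    (h : c ≠ d) : pvRowOf (ev ++ [(d, short)]) c = pvRowOf ev c := by
  unfold pvRowOf
  rw [pv_count_append_single, pv_count_append_single, pv_count_append_single,
      pv_count_append_single]
  have : ∀ k : String, ((c, k) = ((d, short) : String × String)) = False := by
    intro k; simp [Prod.ext_iff, h]
  simp [this]

theorem pv_row_modify_fp (a b c e : Int) :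
    (pvRow a b c e).modify "fp" 0 (· + 1) = pvRow (a + 1) b c e := by
  simp [pvRow, PySem.Dict.modify, PySem.Dict.insert, PySem.Dict.contains,
        PySem.Dict.getD, PySem.Dict.get?]

theorem pv_row_modify_fn (a b c e : Int) :
    (pvRow a b c e).modify "fn" 0 (· + 1) = pvRow a (b + 1) c e := by
  simp [pvRow, PySem.Dict.modify, PySem.Dict.insert, PySem.Dict.contains,
        PySem.Dict.getD, PySem.Dict.get?, List.find?]

theorem pv_row_modify_tp (a b c e : Int) :
    (pvRow a b c e).modify "tp" 0 (· + 1) = pvRow a b (c + 1) e := by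
  simp [pvRow, PySem.Dict.modify, PySem.Dict.insert, PySem.Dict.contains,
        PySem.Dict.getD, PySem.Dict.get?, List.find?]

theorem pv_row_modify_tn (a b c e : Int) :
    (pvRow a b c e).modify "tn" 0 (· + 1) = pvRow a b c (e + 1) := by
  simp [pvRow, PySem.Dict.modify, PySem.Dict.insert, PySem.Dict.contains,
        PySem.Dict.getD, PySem.Dict.get?, List.find?]

theorem pv_rowOf_append_self (ev : List (String × String)) (d short : String)
    (hshort : short ∈ (["fp", "fn", "tp", "tn"] : List String)) :
    pvRowOf (ev ++ [(d, short)]) d = (pvRowOf ev d).modify short 0 (· + 1) := by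
  unfold pvRowOf
  rw [pv_count_append_single, pv_count_append_single, pv_count_append_single,
      pv_count_append_single]
  fin_cases hshort <;>
    simp [Prod.ext_iff, pv_row_modify_fp, pv_row_modify_fn, pv_row_modify_tp, pv_row_modify_tn]

theorem pv_rowOf_default (ev : List (String × String)) (d : String)
    (h : d ∉ pvSeen ev) : pvRowOf ev d = pvRowDefault := by
  unfold pvRowOf
  rw [pv_count_zero_of_not_seen ev d _ h, pv_count_zero_of_not_seen ev d _ h,
      pv_count_zero_of_not_seen ev d _ h, pv_count_zero_of_not_seen ev d _ h]
  rfl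

theorem pv_step (ev : List (String × String)) (d short : String)
    (hshort : short ∈ (["fp", "fn", "tp", "tn"] : List String)) :
    pvBump (pvStatsOf ev) d short = pvStatsOf (ev ++ [(d, short)]) := by
  unfold pvBump pvStatsOf
  rw [pv_getD_mk_map, pv_seen_append_single]
  refine pv_insert_mk_map (pvSeen ev) (fun c => pvRowOf ev c)
    (fun c => pvRowOf (ev ++ [(d, short)]) c) d _ ?_ ?_
  · by_cases hmem : d ∈ pvSeen ev
    · rw [if_pos hmem]; exact (pv_rowOf_append_self ev d short hshort).symm
    · rw [if_neg hmem, ← pv_rowOf_default ev d hmem]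
      exact (pv_rowOf_append_self ev d short hshort).symm
  · intro c hc
    exact pv_rowOf_append_ne ev d short c hc

theorem pv_fold_cases (cases : List (List (String × String))) (ev : List (String × String))
    (short : String) (hshort : short ∈ (["fp", "fn", "tp", "tn"] : List String)) :
    cases.foldl (fun st case => pvBump st (pvCaseGet case) short) (pvStatsOf ev)
      = pvStatsOf (ev ++ cases.map (fun c => (pvCaseGet c, short))) := by
  induction cases generalizing ev with
  | nil => simp
  | cons a t ih =>
    simp only [List.foldl_cons, List.map_cons]
    rw [pv_step ev (pvCaseGet a) short hshort, ih]
    simp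

theorem pv_foldl_const {α β : Type} (l : List α) (s : β) : l.foldl (fun s _ => s) s = s := by
  induction l with
  | nil => rfl
  | cons a t ih => exact ih

theorem pv_main (errors : List (String × List (List (String × String))))
    (ev : List (String × String)) :
    errors.foldl (fun stats e =>
        e.2.foldl (fun stats case =>
          let cancer := pvCaseGet case
          if e.1 == "false_positives" then pvBump stats cancer "fp"
          else if e.1 == "false_negatives" then pvBump stats cancer "fn"
          else if e.1 == "true_positives" then pvBump stats cancer "tp"
          else if e.1 == "true_negatives" then pvBump stats cancer "tn"
          else stats) stats) (pvStatsOf ev)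
      = pvStatsOf (errors.foldl (fun ev e =>
          match pvCatKeys.get? e.1 with
          | none => ev
          | some short => e.2.foldl (fun ev case => ev ++ [(pvCaseGet case, short)]) ev) ev) := by
  induction errors generalizing ev with
  | nil => rfl
  | cons e t ih =>
    obtain ⟨cat, cases⟩ := e
    simp only [List.foldl_cons]
    by_cases hfp : cat = "false_positives"
    · subst hfp
      have hget : pvCatKeys.get? "false_positives" = some "fp" := rfl
      simp only [hget, beq_self_eq_true, if_true]
      rw [PySem.List.foldl_append_singleton_eq_map (fun case => (pvCaseGet case, "fp")),
          pv_fold_cases cases ev "fp" (by decide)]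
      exact ih _
    · by_cases hfn : cat = "false_negatives"
      · subst hfn
        have hget : pvCatKeys.get? "false_negatives" = some "fn" := rfl
        have hne1 : ("false_negatives" == "false_positives") = false := rfl
        simp only [hget, hne1, beq_self_eq_true, if_true, if_false, Bool.false_eq_true]
        rw [PySem.List.foldl_append_singleton_eq_map (fun case => (pvCaseGet case, "fn")),
            pv_fold_cases cases ev "fn" (by decide)]
        exact ih _
      · by_cases htp : cat = "true_positives"
        · subst htp
          have hget : pvCatKeys.get? "true_positives" = some "tp" := rfl
          have hne1 : ("true_positives" == "false_positives") = false := rfl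
          have hne2 : ("true_positives" == "false_negatives") = false := rfl
          simp only [hget, hne1, hne2, beq_self_eq_true, if_true, if_false, Bool.false_eq_true]
          rw [PySem.List.foldl_append_singleton_eq_map (fun case => (pvCaseGet case, "tp")),
              pv_fold_cases cases ev "tp" (by decide)]
          exact ih _
        · by_cases htn : cat = "true_negatives"
          · subst htn
            have hget : pvCatKeys.get? "true_negatives" = some "tn" := rfl
            have hne1 : ("true_negatives" == "false_positives") = false := rfl
            have hne2 : ("true_negatives" == "false_negatives") = false := rfl
            have hne3 : ("true_negatives" == "true_positives") = false := rfl
            simp only [hget, hne1, hne2, hne3, beq_self_eq_true, if_true, if_false,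
                       Bool.false_eq_true]
            rw [PySem.List.foldl_append_singleton_eq_map (fun case => (pvCaseGet case, "tn")),
                pv_fold_cases cases ev "tn" (by decide)]
            exact ih _
          · have e1 : ("false_positives" == cat) = false := beq_eq_false_iff_ne.2 (Ne.symm hfp)
            have e2 : ("false_negatives" == cat) = false := beq_eq_false_iff_ne.2 (Ne.symm hfn)
            have e3 : ("true_positives" == cat) = false := beq_eq_false_iff_ne.2 (Ne.symm htp)
            have e4 : ("true_negatives" == cat) = false := beq_eq_false_iff_ne.2 (Ne.symm htn)
            have hget : pvCatKeys.get? cat = none := by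
              simp only [pvCatKeys, PySem.Dict.get?, List.find?, e1, e2, e3, e4, Option.map_none]
            have b1 : (cat == "false_positives") = false := beq_eq_false_iff_ne.2 hfp
            have b2 : (cat == "false_negatives") = false := beq_eq_false_iff_ne.2 hfn
            have b3 : (cat == "true_positives") = false := beq_eq_false_iff_ne.2 htp
            have b4 : (cat == "true_negatives") = false := beq_eq_false_iff_ne.2 htn
            simp only [hget, b1, b2, b3, b4, Bool.false_eq_true, if_false]
            rw [pv_foldl_const]
            exact ih ev

-- ===== VERDICT (by name: the statement is the Claim_ definition above) =====
theorem analyze_by_cancer_type_spec : Claim_equal_analyze_by_cancer_type := by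
  intro errors _
  show analyze_by_cancer_type errors = analyze_by_cancer_type_alt errors
  have h := pv_main errors []
  rw [show pvStatsOf [] = PySem.Dict.empty from rfl] at h
  simp only [analyze_by_cancer_type, analyze_by_cancer_type_alt]
  rw [h]
  simp only [pvStatsOf, List.map_map, Function.comp_def]
  rfl
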